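-- pv_equiv track=rewrite | github.com/steukk/alg_4 | code.py | optimal_brute_force
-- ===== SOURCE A (Python) =====
-- def optimal_brute_force(machines, jobs):
--     from itertools import product
--
--     best_makespan = float('inf')
--     best_assignment = None
--
--     # Генерируем все возможные распределения
--     for assignment in product(range(machines), repeat=len(jobs)):
--         machine_loads = [0] * machines
--         for job_idx, machine_idx in enumerate(assignment):
--             machine_loads[machine_idx] += jobs[job_idx]
--
--         current_makespan = max(machine_loads)
--         if current_makespan < best_makespan:
--             best_makespan = current_makespan
--             best_assignment = assignment
--
--     return best_assignment, best_makespan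
-- ===== SOURCE B (Python) =====
-- def optimal_brute_force(machines, jobs):
--     # DFS over jobs with incremental machine loads; keeps the first (lex-smallest)
--     # assignment achieving the minimal makespan, like A's strict-improvement scan.
--     n = len(jobs)
--     loads = [0] * machines
--     def rec(i):
--         if i == n:
--             return [], max(loads)
--         best = None
--         for m in range(machines):
--             loads[m] += jobs[i]
--             tail, mk = rec(i + 1)
--             loads[m] -= jobs[i]
--             if best is None or mk < best[1]:
--                 best = ([m] + tail, mk)
--         return best
--     a, mk = rec(0)
--     return tuple(a), mk
-- ===== Notes on version B (the rewrite author's own statement) =====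
-- stated objective: alternative
-- what changed: B replaces A's itertools.product enumeration (which rebuilds the whole load vector from scratch for every assignment) by a depth-first recursion over the jobs that carries the machine loads incrementally and keeps the first strictly-better (hence lex-smallest) optimum per level.
-- outside the precondition, e.g. on optimal_brute_force(0, [1]): A returns (None, inf), B raises TypeError; on optimal_brute_force(0, []): A raises ValueError, B raises ValueError
import Mathlib
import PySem

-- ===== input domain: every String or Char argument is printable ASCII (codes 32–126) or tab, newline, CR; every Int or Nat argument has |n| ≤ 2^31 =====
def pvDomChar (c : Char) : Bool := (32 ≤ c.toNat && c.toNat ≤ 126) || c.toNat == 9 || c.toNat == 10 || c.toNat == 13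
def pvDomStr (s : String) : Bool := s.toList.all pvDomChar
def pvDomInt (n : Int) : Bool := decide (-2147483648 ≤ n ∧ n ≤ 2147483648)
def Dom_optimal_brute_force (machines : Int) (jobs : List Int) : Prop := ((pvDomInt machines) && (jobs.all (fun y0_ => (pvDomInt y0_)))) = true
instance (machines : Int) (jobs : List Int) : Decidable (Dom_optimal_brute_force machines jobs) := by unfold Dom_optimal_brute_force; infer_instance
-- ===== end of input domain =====

-- B replaces A's full product enumeration (loads recomputed from scratch per assignment) by a
-- depth-first recursion over the jobs with incrementally maintained machine loads; same
-- first-strict-improvement (lex-smallest optimal) result, proved equal for machines >= 1.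


-- ===== PORT A =====
-- loads[i] += v  (the index is 0 ≤ i < len(loads) at every use site, where pySetD/pyGetD are Python-exact)
def pvBump (L : List Int) (i : Int) (v : Int) : List Int :=
  PySem.List.pySetD L i (PySem.List.pyGetD L i 0 + v)

-- max(loads); Python raises ValueError on an empty list — that happens only outside Pre_ (machines ≤ 0)
def pvMax (L : List Int) : Int :=
  match PySem.List.max? L (fun x => x) with
  | some v => v
  | none => 0

-- list(itertools.product(range(machines), repeat=n)) in Python's order (leftmost position most significant)
def pvTuples (machines : Int) : Nat → List (List Int)
  | 0 => [[]]
  | n + 1 => (PySem.List.pyRange 0 machines 1).flatMap (fun x => (pvTuples machines n).map (x :: ·))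

-- float('inf') / best_assignment=None are modelled by the `none` state of the running best;
-- on machines ≤ 0 (outside Pre_) Python returns (None, inf) or raises, the port returns ([], 0).
def optimal_brute_force (machines : Int) (jobs : List Int) : List Int × Int :=
  let res := (pvTuples machines jobs.length).foldl
    (fun best assignment =>
      let loads := (PySem.List.enumerate assignment 0).foldl
        (fun L q => pvBump L q.2 (PySem.List.pyGetD jobs q.1 0))
        (List.replicate machines.toNat 0)
      let cur := pvMax loads
      match best with
      | none => some (assignment, cur)
      | some b => if cur < b.2 then some (assignment, cur) else best) none
  match res with
  | some (a, mk) => (a, mk)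
  | none => ([], 0)

-- ===== PORT B =====
-- rec(i) of Source B: the mutable loads list is passed explicitly (Source B restores loads after each branch,
-- so the recursive call receives exactly `pvBump loads m j`); `none` is Python's best=None. The
-- `| none => best` arm is Python's unpacking of a None result, reachable only when machines ≤ 0.
def pvRecB (machines : Int) (loads : List Int) : List Int → Option (List Int × Int)
  | [] => some ([], pvMax loads)
  | j :: rest =>
    (PySem.List.pyRange 0 machines 1).foldl
      (fun best m =>
        match pvRecB machines (pvBump loads m j) rest with
        | some (tail, mk) =>
          match best with
          | none => some (m :: tail, mk)
          | some b => if mk < b.2 then some (m :: tail, mk) else best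
        | none => best)
      none

def optimal_brute_force_alt (machines : Int) (jobs : List Int) : List Int × Int :=
  match pvRecB machines (List.replicate machines.toNat 0) jobs with
  | some (a, mk) => (a, mk)
  | none => ([], 0)

-- ===== PRECONDITION & SPEC =====
-- Pre_ excludes machines ≤ 0, where Python A either raises ValueError (jobs = []) or returns
-- (None, float('inf')), which is not a value of the declared type List Int × Int.
def Pre_optimal_brute_force (machines : Int) (_jobs : List Int) : Prop := 1 ≤ machines
instance (machines : Int) (jobs : List Int) : Decidable (Pre_optimal_brute_force machines jobs) := by
  unfold Pre_optimal_brute_force; infer_instance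

def pvWitness_optimal_brute_force : Int × List Int := (2, [3, 1, 2])

def Spec_optimal_brute_force (machines : Int) (jobs : List Int) (out : List Int × Int) : Prop :=
  out = optimal_brute_force_alt machines jobs
instance (machines : Int) (jobs : List Int) (out : List Int × Int) : Decidable (Spec_optimal_brute_force machines jobs out) := by
  unfold Spec_optimal_brute_force; infer_instance

-- ===== CLAIM (what is proved, stated in full; the proofs are below) =====
def Claim_equal_optimal_brute_force : Prop := ∀ (machines : Int) (jobs : List Int), Dom_optimal_brute_force machines jobs → Pre_optimal_brute_force machines jobs → Spec_optimal_brute_force machines jobs (optimal_brute_force machines jobs)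

-- ===== LEMMAS AND PROOFS =====

-- the strict-improvement accumulator step both programs use (A inline, B per level)
def pvStep (best : Option (List Int × Int)) (p : List Int × Int) : Option (List Int × Int) :=
  match best with
  | none => some p
  | some b => if p.2 < b.2 then some p else best

-- "first strict minimum" of a candidate list
def pvFmin (L : List (List Int × Int)) : Option (List Int × Int) := L.foldl pvStep none

def pvCombine (b : Option (List Int × Int)) (o : Option (List Int × Int)) : Option (List Int × Int) :=
  match o with
  | none => b
  | some p => pvStep b p

-- apply one (job, machine) pair to the load vector
def pvZBump (L : List Int) (p : Int × Int) : List Int := pvBump L p.2 p.1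

lemma pvStep_assoc (b : Option (List Int × Int)) (p r : List Int × Int) :
    pvStep (pvStep b p) r = pvStep b (if r.2 < p.2 then r else p) := by
  cases b with
  | none => simp only [pvStep]; split_ifs <;> simp_all
  | some q => simp only [pvStep]; split_ifs <;> simp_all <;> omega

lemma pvStep_some (p r : List Int × Int) :
    pvStep (some p) r = some (if r.2 < p.2 then r else p) := by
  simp only [pvStep]; split_ifs <;> rfl

-- folding the strict-improvement step from any start = combining the start with the list's first minimum
lemma pvFoldl_step_eq_combine (L : List (List Int × Int)) :
    ∀ b, L.foldl pvStep b = pvCombine b (pvFmin L) := by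
  induction L with
  | nil => intro b; simp [pvFmin, pvCombine]
  | cons p L ih =>
    intro b
    have h1 : pvFmin (p :: L) = pvCombine (some p) (pvFmin L) := by
      simpa [pvFmin, pvStep] using ih (some p)
    simp only [List.foldl_cons, ih (pvStep b p), h1]
    cases hf : pvFmin L with
    | none => simp [pvCombine]
    | some r => simp only [pvCombine, pvStep_some, pvStep_assoc]

lemma pvFoldl_step_map_cons (m : Int) (L : List (List Int × Int)) :
    ∀ b, (L.map (fun p => (m :: p.1, p.2))).foldl pvStep (Option.map (fun p : List Int × Int => (m :: p.1, p.2)) b)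
      = Option.map (fun p : List Int × Int => (m :: p.1, p.2)) (L.foldl pvStep b) := by
  induction L with
  | nil => intro b; simp
  | cons p L ih =>
    intro b
    simp only [List.map_cons, List.foldl_cons, ← ih (pvStep b p)]
    congr 1
    cases b with
    | none => rfl
    | some q => simp only [pvStep, Option.map_some]; split_ifs <;> rfl

-- prepending the chosen machine to every candidate commutes with taking the first minimum
lemma pvFmin_map_cons (m : Int) (L : List (List Int × Int)) :
    pvFmin (L.map (fun p => (m :: p.1, p.2))) =
      Option.map (fun p : List Int × Int => (m :: p.1, p.2)) (pvFmin L) := by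
  simpa using pvFoldl_step_map_cons m L none

lemma pvFoldl_step_flatMap {α : Type} (g : α → List (List Int × Int)) (R : List α) :
    ∀ b, (R.flatMap g).foldl pvStep b = R.foldl (fun b m => (g m).foldl pvStep b) b := by
  induction R with
  | nil => intro b; simp
  | cons m R ih => intro b; simp [List.flatMap_cons, List.foldl_append, ih]

-- B's DFS computes the first strict minimum over all assignment tuples, keyed by the
-- makespan obtained by applying the (job, machine) pairs to the incoming load vector
lemma pvRecB_eq (machines : Int) (rem : List Int) :
    ∀ loads, pvRecB machines loads rem =
      pvFmin ((pvTuples machines rem.length).map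
        (fun t => (t, pvMax ((rem.zip t).foldl pvZBump loads)))) := by
  induction rem with
  | nil => intro loads; simp [pvRecB, pvTuples, pvFmin, pvStep]
  | cons j rest ih =>
    intro loads
    have hmap : ((pvTuples machines (j :: rest).length).map
        (fun t => (t, pvMax (((j :: rest).zip t).foldl pvZBump loads))))
      = (PySem.List.pyRange 0 machines 1).flatMap (fun m =>
          ((pvTuples machines rest.length).map
            (fun t => (t, pvMax ((rest.zip t).foldl pvZBump (pvBump loads m j))))).map
            (fun p => (m :: p.1, p.2))) := by
      simp only [List.length_cons, pvTuples, List.map_flatMap, List.map_map]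
      apply List.flatMap_congr
      intro m _
      apply List.map_congr_left
      intro t _
      simp [Function.comp, List.zip_cons_cons, pvZBump]
    rw [hmap]
    show (PySem.List.pyRange 0 machines 1).foldl _ none = pvFmin _
    rw [pvFmin, pvFoldl_step_flatMap]
    have hstep : (fun (best : Option (List Int × Int)) (m : Int) =>
        match pvRecB machines (pvBump loads m j) rest with
        | some (tail, mk) =>
          match best with
          | none => some (m :: tail, mk)
          | some b => if mk < b.2 then some (m :: tail, mk) else best
        | none => best)
      = (fun b m =>
          (((pvTuples machines rest.length).map
            (fun t => (t, pvMax ((rest.zip t).foldl pvZBump (pvBump loads m j))))).map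
            (fun p => (m :: p.1, p.2))).foldl pvStep b) := by
      funext b m
      rw [pvFoldl_step_eq_combine, pvFmin_map_cons, ← ih (pvBump loads m j)]
      cases hf : pvRecB machines (pvBump loads m j) rest with
      | none => rfl
      | some p => cases p with
        | mk tail mk => cases b <;> rfl
    rw [hstep]

lemma pvTuples_length (machines : Int) (n : Nat) :
    ∀ t ∈ pvTuples machines n, t.length = n := by
  induction n with
  | zero => intro t ht; simp [pvTuples] at ht; simp [ht]
  | succ n ih =>
    intro t ht
    simp only [pvTuples, List.mem_flatMap, List.mem_map] at ht
    obtain ⟨m, _, t', ht', rfl⟩ := ht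
    simp [ih t' ht']

-- A's per-assignment load computation (enumerate + jobs[job_idx]) = folding the zipped pairs
lemma pvEnum_zip (jobs : List Int) (t : List Int) :
    ∀ (k : Nat) (L : List Int), k + t.length ≤ jobs.length →
      (PySem.List.enumerate t (k : Int)).foldl
          (fun L q => pvBump L q.2 (PySem.List.pyGetD jobs q.1 0)) L
        = ((jobs.drop k).zip t).foldl pvZBump L := by
  induction t with
  | nil => intro k L _; simp [PySem.List.enumerate_nil]
  | cons m t ih =>
    intro k L hk
    have hklt : k < jobs.length := by simp at hk; omega
    have hdrop : jobs.drop k = jobs[k] :: jobs.drop (k + 1) :=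
      List.drop_eq_getElem_cons hklt
    rw [PySem.List.enumerate_cons, hdrop]
    simp only [List.foldl_cons, List.zip_cons_cons]
    have hget : PySem.List.pyGetD jobs (k : Int) 0 = jobs[k] := by
      rw [PySem.List.pyGetD_natCast]
      exact List.getD_eq_getElem _ _ hklt
    have hcast : (k : Int) + 1 = ((k + 1 : Nat) : Int) := by push_cast; ring
    rw [hget, hcast, ih (k + 1) _ (by simp at hk ⊢; omega)]
    rfl

lemma pvMain_eq (machines : Int) (jobs : List Int) :
    optimal_brute_force machines jobs = optimal_brute_force_alt machines jobs := by
  have key : (pvTuples machines jobs.length).foldl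
      (fun best assignment =>
        let loads := (PySem.List.enumerate assignment 0).foldl
          (fun L q => pvBump L q.2 (PySem.List.pyGetD jobs q.1 0))
          (List.replicate machines.toNat 0)
        let cur := pvMax loads
        match best with
        | none => some (assignment, cur)
        | some b => if cur < b.2 then some (assignment, cur) else best) none
    = pvRecB machines (List.replicate machines.toNat 0) jobs := by
    rw [pvRecB_eq]
    have hstep : (fun (best : Option (List Int × Int)) (assignment : List Int) =>
        let loads := (PySem.List.enumerate assignment 0).foldl
          (fun L q => pvBump L q.2 (PySem.List.pyGetD jobs q.1 0))
          (List.replicate machines.toNat 0)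
        let cur := pvMax loads
        match best with
        | none => some (assignment, cur)
        | some b => if cur < b.2 then some (assignment, cur) else best)
      = fun b t => pvStep ((fun x => x) b)
          ((fun t => (t, pvMax ((PySem.List.enumerate t 0).foldl
            (fun L q => pvBump L q.2 (PySem.List.pyGetD jobs q.1 0))
            (List.replicate machines.toNat 0)))) t) := by
      funext b t
      cases b <;> rfl
    rw [hstep, ← List.foldl_map]
    have hmaps : (pvTuples machines jobs.length).map (fun t => (t, pvMax ((PySem.List.enumerate t 0).foldl
          (fun L q => pvBump L q.2 (PySem.List.pyGetD jobs q.1 0))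
          (List.replicate machines.toNat 0))))
        = (pvTuples machines jobs.length).map
          (fun t => (t, pvMax ((jobs.zip t).foldl pvZBump (List.replicate machines.toNat 0)))) := by
      apply List.map_congr_left
      intro t ht
      have hlen : t.length = jobs.length := pvTuples_length machines jobs.length t ht
      have h0 : ((0 : Nat) : Int) = (0 : Int) := by norm_num
      have hz := pvEnum_zip jobs t 0 (List.replicate machines.toNat 0) (by omega)
      rw [h0] at hz
      rw [hz]
      simp
    rw [hmaps]
    rfl
  show (match (pvTuples machines jobs.length).foldl
      (fun best assignment =>
        let loads := (PySem.List.enumerate assignment 0).foldl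
          (fun L q => pvBump L q.2 (PySem.List.pyGetD jobs q.1 0))
          (List.replicate machines.toNat 0)
        let cur := pvMax loads
        match best with
        | none => some (assignment, cur)
        | some b => if cur < b.2 then some (assignment, cur) else best) none with
    | some (a, mk) => (a, mk)
    | none => ([], 0))
    = (match pvRecB machines (List.replicate machines.toNat 0) jobs with
    | some (a, mk) => (a, mk)
    | none => ([], 0))
  rw [key]

-- ===== VERDICT (by name: the statement is the Claim_ definition above) =====
theorem optimal_brute_force_spec : Claim_equal_optimal_brute_force := by
  intro machines jobs _ _
  unfold Spec_optimal_brute_force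
  exact pvMain_eq machines jobs
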